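-- pv_equiv track=rewrite | github.com/lucasmullerm/tg | util.py | getMidiScaleMap
-- ===== SOURCE A (Python) =====
-- MAJOR = 'major'
--
-- MAJOR_DELTAS = [2, 2, 1, 2, 2, 2, 1]
--
-- MINOR_DELTAS = [2, 1, 2, 2, 1, 2, 2]
--
-- NOTES = {'A' : 10,
--          'A#': 11, 'B-': 11,
--          'B' : 12,
--          'C' : 1,
--          'C#': 2, 'D-': 2,
--          'D' : 3,
--          'D#': 4, 'E-': 4,
--          'E' : 5,
--          'F' : 6,
--          'F#': 7, 'G-': 7,
--          'G' : 8,
--          'G#': 9, 'A-': 9}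
--
-- def getMidiScaleMap(tonic, mode=MAJOR):
--     final_map = [-1] * 130
--     id = NOTES[tonic] - 1
--     final_map[id] = 0
--     deltas = MAJOR_DELTAS if mode == MAJOR else MINOR_DELTAS
--     d_id = 0
--     while id < 128:
--         id += 1
--         if deltas[d_id] == 1:
--             prev = final_map[id-1]
--             final_map[id] = prev + 2
--         elif deltas[d_id] == 2:
--             prev = final_map[id-1]
--             final_map[id] = prev + 1
--             id += 1
--             prev = final_map[id-1]
--             final_map[id] = prev + 1
--         d_id += 1
--         d_id %= 7
--     return final_map
-- ===== SOURCE B (Python) =====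
-- MAJOR = 'major'
--
-- MAJOR_DELTAS = [2, 2, 1, 2, 2, 2, 1]
-- MINOR_DELTAS = [2, 1, 2, 2, 1, 2, 2]
--
-- NOTES = {'A' : 10,
--          'A#': 11, 'B-': 11,
--          'B' : 12,
--          'C' : 1,
--          'C#': 2, 'D-': 2,
--          'D' : 3,
--          'D#': 4, 'E-': 4,
--          'E' : 5,
--          'F' : 6,
--          'F#': 7, 'G-': 7,
--          'G' : 8,
--          'G#': 9, 'A-': 9}
--
-- # Value assigned to each chromatic offset within one octave above the tonic;
-- # every full octave adds 14 (7 scale degrees, two per degree).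
-- MAJOR_PAT = [0, 1, 2, 3, 4, 6, 7, 8, 9, 10, 11, 12]
-- MINOR_PAT = [0, 1, 2, 4, 5, 6, 7, 8, 10, 11, 12, 13]
--
-- def getMidiScaleMap(tonic, mode=MAJOR):
--     t = NOTES[tonic] - 1
--     deltas = MAJOR_DELTAS if mode == MAJOR else MINOR_DELTAS
--     pat = MAJOR_PAT if mode == MAJOR else MINOR_PAT
--     # the map runs from the tonic up to the first scale note at or above 128
--     hi, d = t, 0
--     while hi < 128:
--         hi += deltas[d % 7]
--         d += 1
--     return [14 * ((i - t) // 12) + pat[(i - t) % 12] if t <= i <= hi else -1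
--             for i in range(130)]
-- ===== Notes on version B (the rewrite author's own statement) =====
-- stated objective: simpler
-- what changed: Replaces A's stateful chromatic while loop (cycling a 7-entry delta list, each slot filled from the previously written slot, with in-loop double increments) by a per-index closed form: a small loop walks the scale to find the last filled index, then one comprehension computes every slot as a fixed 12-entry per-octave pattern plus 14 per octave. Pre_ excludes tonics that are not keys of NOTES, on which A raises KeyError.
import Mathlib
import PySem

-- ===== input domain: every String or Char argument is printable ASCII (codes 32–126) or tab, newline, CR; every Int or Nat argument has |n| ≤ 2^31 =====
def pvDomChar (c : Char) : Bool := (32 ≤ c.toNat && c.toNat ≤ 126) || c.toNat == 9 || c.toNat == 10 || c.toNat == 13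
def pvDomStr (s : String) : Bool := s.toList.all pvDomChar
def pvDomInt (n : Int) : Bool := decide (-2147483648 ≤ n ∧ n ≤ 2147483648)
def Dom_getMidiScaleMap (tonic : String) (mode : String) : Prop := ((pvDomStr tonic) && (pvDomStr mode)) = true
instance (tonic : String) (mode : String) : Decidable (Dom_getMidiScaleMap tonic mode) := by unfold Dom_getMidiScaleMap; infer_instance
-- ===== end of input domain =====

-- B replaces A's stateful chromatic fill (cycling deltas, each slot written from the
-- previously written slot) by a per-index closed form: a fixed 12-entry per-octave value
-- pattern plus 14 per octave, over the range ending at the first scale note ≥ 128;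
-- objective: simpler.

-- ===== PORT A =====
def pvNOTES : PySem.Dict String Int := PySem.Dict.ofList
  [("A", 10), ("A#", 11), ("B-", 11), ("B", 12), ("C", 1), ("C#", 2), ("D-", 2),
   ("D", 3), ("D#", 4), ("E-", 4), ("E", 5), ("F", 6), ("F#", 7), ("G-", 7),
   ("G", 8), ("G#", 9), ("A-", 9)]

def pvMAJOR_DELTAS : List Int := [2, 2, 1, 2, 2, 2, 1]
def pvMINOR_DELTAS : List Int := [2, 1, 2, 2, 1, 2, 2]

-- A's while loop; fuel 130 is enough: id starts at NOTES[tonic]-1 ≥ 0 and strictly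
-- increases each iteration, and the loop stops once 128 ≤ id.
def pvLoopA : Nat → List Int → Int → Int → List Int → List Int
  | 0, fm, _, _, _ => fm
  | n + 1, fm, id, d_id, deltas =>
    if id < 128 then
      let id := id + 1
      if PySem.List.pyGetD deltas d_id 0 = 1 then
        let prev := PySem.List.pyGetD fm (id - 1) 0
        let fm := PySem.List.pySetD fm id (prev + 2)
        pvLoopA n fm id (PySem.Int.mod (d_id + 1) 7) deltas
      else if PySem.List.pyGetD deltas d_id 0 = 2 then
        let prev := PySem.List.pyGetD fm (id - 1) 0
        let fm := PySem.List.pySetD fm id (prev + 1)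
        let id := id + 1
        let prev := PySem.List.pyGetD fm (id - 1) 0
        let fm := PySem.List.pySetD fm id (prev + 1)
        pvLoopA n fm id (PySem.Int.mod (d_id + 1) 7) deltas
      else
        pvLoopA n fm id (PySem.Int.mod (d_id + 1) 7) deltas
    else fm

-- NOTES[tonic] raises KeyError unless tonic is a key; Pre_ restricts to the keys, so
-- getD's default 0 is never the value used; all list indices are then in range (pySetD/pyGetD exact).
def getMidiScaleMap (tonic : String) (mode : String) : List Int :=
  let final_map := List.replicate 130 (-1 : Int)
  let id := PySem.Dict.getD pvNOTES tonic 0 - 1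
  let final_map := PySem.List.pySetD final_map id 0
  let deltas := if mode = "major" then pvMAJOR_DELTAS else pvMINOR_DELTAS
  pvLoopA 130 final_map id 0 deltas

-- ===== PORT B =====
def pvMAJOR_PAT : List Int := [0, 1, 2, 3, 4, 6, 7, 8, 9, 10, 11, 12]
def pvMINOR_PAT : List Int := [0, 1, 2, 4, 5, 6, 7, 8, 10, 11, 12, 13]

-- Source B's while loop walking the scale up to the first note ≥ 128; fuel 130 suffices
-- (hi starts ≥ 0 and grows by at least 1 per iteration).
def pvHiLoop : Nat → Int → Int → List Int → Int
  | 0, hi, _, _ => hi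
  | n + 1, hi, d, deltas =>
    if hi < 128 then
      pvHiLoop n (hi + PySem.List.pyGetD deltas (PySem.Int.mod d 7) 0) (d + 1) deltas
    else hi

def getMidiScaleMap_alt (tonic : String) (mode : String) : List Int :=
  let t := PySem.Dict.getD pvNOTES tonic 0 - 1
  let deltas := if mode = "major" then pvMAJOR_DELTAS else pvMINOR_DELTAS
  let pat := if mode = "major" then pvMAJOR_PAT else pvMINOR_PAT
  let hi := pvHiLoop 130 t 0 deltas
  (PySem.List.pyRange 0 130 1).map (fun i =>
    if t ≤ i ∧ i ≤ hi then
      14 * PySem.Int.floordiv (i - t) 12 + PySem.List.pyGetD pat (PySem.Int.mod (i - t) 12) 0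
    else -1)

-- ===== PRECONDITION & SPEC =====
-- Pre_: exactly the tonics that are keys of NOTES; on any other tonic A raises KeyError.
def Pre_getMidiScaleMap (tonic : String) (mode : String) : Prop :=
  tonic ∈ ["A", "A#", "B-", "B", "C", "C#", "D-", "D", "D#", "E-", "E", "F", "F#", "G-", "G", "G#", "A-"]
instance (tonic : String) (mode : String) : Decidable (Pre_getMidiScaleMap tonic mode) := by
  unfold Pre_getMidiScaleMap; infer_instance

def pvWitness_getMidiScaleMap : String × String := ("C", "major")

def Spec_getMidiScaleMap (tonic : String) (mode : String) (out : List Int) : Prop := out = getMidiScaleMap_alt tonic mode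
instance (tonic : String) (mode : String) (out : List Int) : Decidable (Spec_getMidiScaleMap tonic mode out) := by unfold Spec_getMidiScaleMap; infer_instance

-- ===== CLAIM (what is proved, stated in full; the proofs are below) =====
def Claim_equal_getMidiScaleMap : Prop := ∀ (tonic : String) (mode : String), Dom_getMidiScaleMap tonic mode → Pre_getMidiScaleMap tonic mode → Spec_getMidiScaleMap tonic mode (getMidiScaleMap tonic mode)

-- ===== LEMMAS AND PROOFS =====
set_option maxRecDepth 100000
set_option maxHeartbeats 1000000

-- both ports depend on mode only through the test mode = "major"
theorem pvA_mode (tonic mode : String) (h : ¬ mode = "major") :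
    getMidiScaleMap tonic mode = getMidiScaleMap tonic "m" := by
  simp only [getMidiScaleMap, if_neg h, if_neg (show ¬("m" = "major") by decide)]

theorem pvB_mode (tonic mode : String) (h : ¬ mode = "major") :
    getMidiScaleMap_alt tonic mode = getMidiScaleMap_alt tonic "m" := by
  simp only [getMidiScaleMap_alt, if_neg h, if_neg (show ¬("m" = "major") by decide)]

-- both ports depend on tonic only through the NOTES lookup
theorem pvA_congr (t1 t2 mode : String)
    (h : PySem.Dict.getD pvNOTES t1 0 = PySem.Dict.getD pvNOTES t2 0) :
    getMidiScaleMap t1 mode = getMidiScaleMap t2 mode := by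
  simp only [getMidiScaleMap, h]

theorem pvB_congr (t1 t2 mode : String)
    (h : PySem.Dict.getD pvNOTES t1 0 = PySem.Dict.getD pvNOTES t2 0) :
    getMidiScaleMap_alt t1 mode = getMidiScaleMap_alt t2 mode := by
  simp only [getMidiScaleMap_alt, h]

def pvLitMaj0 : List Int := [0, 1, 2, 3, 4, 6, 7, 8, 9, 10, 11, 12, 14, 15, 16, 17, 18, 20, 21, 22, 23, 24, 25, 26, 28, 29, 30, 31, 32, 34, 35, 36, 37, 38, 39, 40, 42, 43, 44, 45, 46, 48, 49, 50, 51, 52, 53, 54, 56, 57, 58, 59, 60, 62, 63, 64, 65, 66, 67, 68, 70, 71, 72, 73, 74, 76, 77, 78, 79, 80, 81, 82, 84, 85, 86, 87, 88, 90, 91, 92, 93, 94, 95, 96, 98, 99, 100, 101, 102, 104, 105, 106, 107, 108, 109, 110, 112, 113, 114, 115, 116, 118, 119, 120, 121, 122, 123, 124, 126, 127, 128, 129, 130, 132, 133, 134, 135, 136, 137, 138, 140, 141, 142, 143, 144, 146, 147, 148, 149, 150]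
theorem pvAMaj0 : getMidiScaleMap "C" "major" = pvLitMaj0 := by decide
theorem pvBMaj0 : getMidiScaleMap_alt "C" "major" = pvLitMaj0 := by decide
theorem pvEMaj0 : getMidiScaleMap "C" "major" = getMidiScaleMap_alt "C" "major" := pvAMaj0.trans pvBMaj0.symm

def pvLitMin0 : List Int := [0, 1, 2, 4, 5, 6, 7, 8, 10, 11, 12, 13, 14, 15, 16, 18, 19, 20, 21, 22, 24, 25, 26, 27, 28, 29, 30, 32, 33, 34, 35, 36, 38, 39, 40, 41, 42, 43, 44, 46, 47, 48, 49, 50, 52, 53, 54, 55, 56, 57, 58, 60, 61, 62, 63, 64, 66, 67, 68, 69, 70, 71, 72, 74, 75, 76, 77, 78, 80, 81, 82, 83, 84, 85, 86, 88, 89, 90, 91, 92, 94, 95, 96, 97, 98, 99, 100, 102, 103, 104, 105, 106, 108, 109, 110, 111, 112, 113, 114, 116, 117, 118, 119, 120, 122, 123, 124, 125, 126, 127, 128, 130, 131, 132, 133, 134, 136, 137, 138, 139, 140, 141, 142, 144, 145, 146, 147, 148, 150, -1]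
theorem pvAMin0 : getMidiScaleMap "C" "m" = pvLitMin0 := by decide
theorem pvBMin0 : getMidiScaleMap_alt "C" "m" = pvLitMin0 := by decide
theorem pvEMin0 : getMidiScaleMap "C" "m" = getMidiScaleMap_alt "C" "m" := pvAMin0.trans pvBMin0.symm

def pvLitMaj1 : List Int := [-1, 0, 1, 2, 3, 4, 6, 7, 8, 9, 10, 11, 12, 14, 15, 16, 17, 18, 20, 21, 22, 23, 24, 25, 26, 28, 29, 30, 31, 32, 34, 35, 36, 37, 38, 39, 40, 42, 43, 44, 45, 46, 48, 49, 50, 51, 52, 53, 54, 56, 57, 58, 59, 60, 62, 63, 64, 65, 66, 67, 68, 70, 71, 72, 73, 74, 76, 77, 78, 79, 80, 81, 82, 84, 85, 86, 87, 88, 90, 91, 92, 93, 94, 95, 96, 98, 99, 100, 101, 102, 104, 105, 106, 107, 108, 109, 110, 112, 113, 114, 115, 116, 118, 119, 120, 121, 122, 123, 124, 126, 127, 128, 129, 130, 132, 133, 134, 135, 136, 137, 138, 140, 141, 142, 143, 144, 146, 147, 148, -1]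
theorem pvAMaj1 : getMidiScaleMap "C#" "major" = pvLitMaj1 := by decide
theorem pvBMaj1 : getMidiScaleMap_alt "C#" "major" = pvLitMaj1 := by decide
theorem pvEMaj1 : getMidiScaleMap "C#" "major" = getMidiScaleMap_alt "C#" "major" := pvAMaj1.trans pvBMaj1.symm

def pvLitMin1 : List Int := [-1, 0, 1, 2, 4, 5, 6, 7, 8, 10, 11, 12, 13, 14, 15, 16, 18, 19, 20, 21, 22, 24, 25, 26, 27, 28, 29, 30, 32, 33, 34, 35, 36, 38, 39, 40, 41, 42, 43, 44, 46, 47, 48, 49, 50, 52, 53, 54, 55, 56, 57, 58, 60, 61, 62, 63, 64, 66, 67, 68, 69, 70, 71, 72, 74, 75, 76, 77, 78, 80, 81, 82, 83, 84, 85, 86, 88, 89, 90, 91, 92, 94, 95, 96, 97, 98, 99, 100, 102, 103, 104, 105, 106, 108, 109, 110, 111, 112, 113, 114, 116, 117, 118, 119, 120, 122, 123, 124, 125, 126, 127, 128, 130, 131, 132, 133, 134, 136, 137, 138, 139, 140, 141, 142, 144, 145, 146, 147, 148, -1]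
theorem pvAMin1 : getMidiScaleMap "C#" "m" = pvLitMin1 := by decide
theorem pvBMin1 : getMidiScaleMap_alt "C#" "m" = pvLitMin1 := by decide
theorem pvEMin1 : getMidiScaleMap "C#" "m" = getMidiScaleMap_alt "C#" "m" := pvAMin1.trans pvBMin1.symm

def pvLitMaj2 : List Int := [-1, -1, 0, 1, 2, 3, 4, 6, 7, 8, 9, 10, 11, 12, 14, 15, 16, 17, 18, 20, 21, 22, 23, 24, 25, 26, 28, 29, 30, 31, 32, 34, 35, 36, 37, 38, 39, 40, 42, 43, 44, 45, 46, 48, 49, 50, 51, 52, 53, 54, 56, 57, 58, 59, 60, 62, 63, 64, 65, 66, 67, 68, 70, 71, 72, 73, 74, 76, 77, 78, 79, 80, 81, 82, 84, 85, 86, 87, 88, 90, 91, 92, 93, 94, 95, 96, 98, 99, 100, 101, 102, 104, 105, 106, 107, 108, 109, 110, 112, 113, 114, 115, 116, 118, 119, 120, 121, 122, 123, 124, 126, 127, 128, 129, 130, 132, 133, 134, 135, 136, 137, 138, 140, 141, 142, 143, 144, 146, 147, 148]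
theorem pvAMaj2 : getMidiScaleMap "D" "major" = pvLitMaj2 := by decide
theorem pvBMaj2 : getMidiScaleMap_alt "D" "major" = pvLitMaj2 := by decide
theorem pvEMaj2 : getMidiScaleMap "D" "major" = getMidiScaleMap_alt "D" "major" := pvAMaj2.trans pvBMaj2.symm

def pvLitMin2 : List Int := [-1, -1, 0, 1, 2, 4, 5, 6, 7, 8, 10, 11, 12, 13, 14, 15, 16, 18, 19, 20, 21, 22, 24, 25, 26, 27, 28, 29, 30, 32, 33, 34, 35, 36, 38, 39, 40, 41, 42, 43, 44, 46, 47, 48, 49, 50, 52, 53, 54, 55, 56, 57, 58, 60, 61, 62, 63, 64, 66, 67, 68, 69, 70, 71, 72, 74, 75, 76, 77, 78, 80, 81, 82, 83, 84, 85, 86, 88, 89, 90, 91, 92, 94, 95, 96, 97, 98, 99, 100, 102, 103, 104, 105, 106, 108, 109, 110, 111, 112, 113, 114, 116, 117, 118, 119, 120, 122, 123, 124, 125, 126, 127, 128, 130, 131, 132, 133, 134, 136, 137, 138, 139, 140, 141, 142, 144, 145, 146, 147, 148]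
theorem pvAMin2 : getMidiScaleMap "D" "m" = pvLitMin2 := by decide
theorem pvBMin2 : getMidiScaleMap_alt "D" "m" = pvLitMin2 := by decide
theorem pvEMin2 : getMidiScaleMap "D" "m" = getMidiScaleMap_alt "D" "m" := pvAMin2.trans pvBMin2.symm

def pvLitMaj3 : List Int := [-1, -1, -1, 0, 1, 2, 3, 4, 6, 7, 8, 9, 10, 11, 12, 14, 15, 16, 17, 18, 20, 21, 22, 23, 24, 25, 26, 28, 29, 30, 31, 32, 34, 35, 36, 37, 38, 39, 40, 42, 43, 44, 45, 46, 48, 49, 50, 51, 52, 53, 54, 56, 57, 58, 59, 60, 62, 63, 64, 65, 66, 67, 68, 70, 71, 72, 73, 74, 76, 77, 78, 79, 80, 81, 82, 84, 85, 86, 87, 88, 90, 91, 92, 93, 94, 95, 96, 98, 99, 100, 101, 102, 104, 105, 106, 107, 108, 109, 110, 112, 113, 114, 115, 116, 118, 119, 120, 121, 122, 123, 124, 126, 127, 128, 129, 130, 132, 133, 134, 135, 136, 137, 138, 140, 141, 142, 143, 144, 146, -1]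
theorem pvAMaj3 : getMidiScaleMap "D#" "major" = pvLitMaj3 := by decide
theorem pvBMaj3 : getMidiScaleMap_alt "D#" "major" = pvLitMaj3 := by decide
theorem pvEMaj3 : getMidiScaleMap "D#" "major" = getMidiScaleMap_alt "D#" "major" := pvAMaj3.trans pvBMaj3.symm

def pvLitMin3 : List Int := [-1, -1, -1, 0, 1, 2, 4, 5, 6, 7, 8, 10, 11, 12, 13, 14, 15, 16, 18, 19, 20, 21, 22, 24, 25, 26, 27, 28, 29, 30, 32, 33, 34, 35, 36, 38, 39, 40, 41, 42, 43, 44, 46, 47, 48, 49, 50, 52, 53, 54, 55, 56, 57, 58, 60, 61, 62, 63, 64, 66, 67, 68, 69, 70, 71, 72, 74, 75, 76, 77, 78, 80, 81, 82, 83, 84, 85, 86, 88, 89, 90, 91, 92, 94, 95, 96, 97, 98, 99, 100, 102, 103, 104, 105, 106, 108, 109, 110, 111, 112, 113, 114, 116, 117, 118, 119, 120, 122, 123, 124, 125, 126, 127, 128, 130, 131, 132, 133, 134, 136, 137, 138, 139, 140, 141, 142, 144, 145, 146, -1]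
theorem pvAMin3 : getMidiScaleMap "D#" "m" = pvLitMin3 := by decide
theorem pvBMin3 : getMidiScaleMap_alt "D#" "m" = pvLitMin3 := by decide
theorem pvEMin3 : getMidiScaleMap "D#" "m" = getMidiScaleMap_alt "D#" "m" := pvAMin3.trans pvBMin3.symm

def pvLitMaj4 : List Int := [-1, -1, -1, -1, 0, 1, 2, 3, 4, 6, 7, 8, 9, 10, 11, 12, 14, 15, 16, 17, 18, 20, 21, 22, 23, 24, 25, 26, 28, 29, 30, 31, 32, 34, 35, 36, 37, 38, 39, 40, 42, 43, 44, 45, 46, 48, 49, 50, 51, 52, 53, 54, 56, 57, 58, 59, 60, 62, 63, 64, 65, 66, 67, 68, 70, 71, 72, 73, 74, 76, 77, 78, 79, 80, 81, 82, 84, 85, 86, 87, 88, 90, 91, 92, 93, 94, 95, 96, 98, 99, 100, 101, 102, 104, 105, 106, 107, 108, 109, 110, 112, 113, 114, 115, 116, 118, 119, 120, 121, 122, 123, 124, 126, 127, 128, 129, 130, 132, 133, 134, 135, 136, 137, 138, 140, 141, 142, 143, 144, -1]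
theorem pvAMaj4 : getMidiScaleMap "E" "major" = pvLitMaj4 := by decide
theorem pvBMaj4 : getMidiScaleMap_alt "E" "major" = pvLitMaj4 := by decide
theorem pvEMaj4 : getMidiScaleMap "E" "major" = getMidiScaleMap_alt "E" "major" := pvAMaj4.trans pvBMaj4.symm

def pvLitMin4 : List Int := [-1, -1, -1, -1, 0, 1, 2, 4, 5, 6, 7, 8, 10, 11, 12, 13, 14, 15, 16, 18, 19, 20, 21, 22, 24, 25, 26, 27, 28, 29, 30, 32, 33, 34, 35, 36, 38, 39, 40, 41, 42, 43, 44, 46, 47, 48, 49, 50, 52, 53, 54, 55, 56, 57, 58, 60, 61, 62, 63, 64, 66, 67, 68, 69, 70, 71, 72, 74, 75, 76, 77, 78, 80, 81, 82, 83, 84, 85, 86, 88, 89, 90, 91, 92, 94, 95, 96, 97, 98, 99, 100, 102, 103, 104, 105, 106, 108, 109, 110, 111, 112, 113, 114, 116, 117, 118, 119, 120, 122, 123, 124, 125, 126, 127, 128, 130, 131, 132, 133, 134, 136, 137, 138, 139, 140, 141, 142, 144, 145, 146]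
theorem pvAMin4 : getMidiScaleMap "E" "m" = pvLitMin4 := by decide
theorem pvBMin4 : getMidiScaleMap_alt "E" "m" = pvLitMin4 := by decide
theorem pvEMin4 : getMidiScaleMap "E" "m" = getMidiScaleMap_alt "E" "m" := pvAMin4.trans pvBMin4.symm

def pvLitMaj5 : List Int := [-1, -1, -1, -1, -1, 0, 1, 2, 3, 4, 6, 7, 8, 9, 10, 11, 12, 14, 15, 16, 17, 18, 20, 21, 22, 23, 24, 25, 26, 28, 29, 30, 31, 32, 34, 35, 36, 37, 38, 39, 40, 42, 43, 44, 45, 46, 48, 49, 50, 51, 52, 53, 54, 56, 57, 58, 59, 60, 62, 63, 64, 65, 66, 67, 68, 70, 71, 72, 73, 74, 76, 77, 78, 79, 80, 81, 82, 84, 85, 86, 87, 88, 90, 91, 92, 93, 94, 95, 96, 98, 99, 100, 101, 102, 104, 105, 106, 107, 108, 109, 110, 112, 113, 114, 115, 116, 118, 119, 120, 121, 122, 123, 124, 126, 127, 128, 129, 130, 132, 133, 134, 135, 136, 137, 138, 140, 141, 142, 143, 144]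
theorem pvAMaj5 : getMidiScaleMap "F" "major" = pvLitMaj5 := by decide
theorem pvBMaj5 : getMidiScaleMap_alt "F" "major" = pvLitMaj5 := by decide
theorem pvEMaj5 : getMidiScaleMap "F" "major" = getMidiScaleMap_alt "F" "major" := pvAMaj5.trans pvBMaj5.symm

def pvLitMin5 : List Int := [-1, -1, -1, -1, -1, 0, 1, 2, 4, 5, 6, 7, 8, 10, 11, 12, 13, 14, 15, 16, 18, 19, 20, 21, 22, 24, 25, 26, 27, 28, 29, 30, 32, 33, 34, 35, 36, 38, 39, 40, 41, 42, 43, 44, 46, 47, 48, 49, 50, 52, 53, 54, 55, 56, 57, 58, 60, 61, 62, 63, 64, 66, 67, 68, 69, 70, 71, 72, 74, 75, 76, 77, 78, 80, 81, 82, 83, 84, 85, 86, 88, 89, 90, 91, 92, 94, 95, 96, 97, 98, 99, 100, 102, 103, 104, 105, 106, 108, 109, 110, 111, 112, 113, 114, 116, 117, 118, 119, 120, 122, 123, 124, 125, 126, 127, 128, 130, 131, 132, 133, 134, 136, 137, 138, 139, 140, 141, 142, 144, -1]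
theorem pvAMin5 : getMidiScaleMap "F" "m" = pvLitMin5 := by decide
theorem pvBMin5 : getMidiScaleMap_alt "F" "m" = pvLitMin5 := by decide
theorem pvEMin5 : getMidiScaleMap "F" "m" = getMidiScaleMap_alt "F" "m" := pvAMin5.trans pvBMin5.symm

def pvLitMaj6 : List Int := [-1, -1, -1, -1, -1, -1, 0, 1, 2, 3, 4, 6, 7, 8, 9, 10, 11, 12, 14, 15, 16, 17, 18, 20, 21, 22, 23, 24, 25, 26, 28, 29, 30, 31, 32, 34, 35, 36, 37, 38, 39, 40, 42, 43, 44, 45, 46, 48, 49, 50, 51, 52, 53, 54, 56, 57, 58, 59, 60, 62, 63, 64, 65, 66, 67, 68, 70, 71, 72, 73, 74, 76, 77, 78, 79, 80, 81, 82, 84, 85, 86, 87, 88, 90, 91, 92, 93, 94, 95, 96, 98, 99, 100, 101, 102, 104, 105, 106, 107, 108, 109, 110, 112, 113, 114, 115, 116, 118, 119, 120, 121, 122, 123, 124, 126, 127, 128, 129, 130, 132, 133, 134, 135, 136, 137, 138, 140, 141, 142, -1]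
theorem pvAMaj6 : getMidiScaleMap "F#" "major" = pvLitMaj6 := by decide
theorem pvBMaj6 : getMidiScaleMap_alt "F#" "major" = pvLitMaj6 := by decide
theorem pvEMaj6 : getMidiScaleMap "F#" "major" = getMidiScaleMap_alt "F#" "major" := pvAMaj6.trans pvBMaj6.symm

def pvLitMin6 : List Int := [-1, -1, -1, -1, -1, -1, 0, 1, 2, 4, 5, 6, 7, 8, 10, 11, 12, 13, 14, 15, 16, 18, 19, 20, 21, 22, 24, 25, 26, 27, 28, 29, 30, 32, 33, 34, 35, 36, 38, 39, 40, 41, 42, 43, 44, 46, 47, 48, 49, 50, 52, 53, 54, 55, 56, 57, 58, 60, 61, 62, 63, 64, 66, 67, 68, 69, 70, 71, 72, 74, 75, 76, 77, 78, 80, 81, 82, 83, 84, 85, 86, 88, 89, 90, 91, 92, 94, 95, 96, 97, 98, 99, 100, 102, 103, 104, 105, 106, 108, 109, 110, 111, 112, 113, 114, 116, 117, 118, 119, 120, 122, 123, 124, 125, 126, 127, 128, 130, 131, 132, 133, 134, 136, 137, 138, 139, 140, 141, 142, -1]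
theorem pvAMin6 : getMidiScaleMap "F#" "m" = pvLitMin6 := by decide
theorem pvBMin6 : getMidiScaleMap_alt "F#" "m" = pvLitMin6 := by decide
theorem pvEMin6 : getMidiScaleMap "F#" "m" = getMidiScaleMap_alt "F#" "m" := pvAMin6.trans pvBMin6.symm

def pvLitMaj7 : List Int := [-1, -1, -1, -1, -1, -1, -1, 0, 1, 2, 3, 4, 6, 7, 8, 9, 10, 11, 12, 14, 15, 16, 17, 18, 20, 21, 22, 23, 24, 25, 26, 28, 29, 30, 31, 32, 34, 35, 36, 37, 38, 39, 40, 42, 43, 44, 45, 46, 48, 49, 50, 51, 52, 53, 54, 56, 57, 58, 59, 60, 62, 63, 64, 65, 66, 67, 68, 70, 71, 72, 73, 74, 76, 77, 78, 79, 80, 81, 82, 84, 85, 86, 87, 88, 90, 91, 92, 93, 94, 95, 96, 98, 99, 100, 101, 102, 104, 105, 106, 107, 108, 109, 110, 112, 113, 114, 115, 116, 118, 119, 120, 121, 122, 123, 124, 126, 127, 128, 129, 130, 132, 133, 134, 135, 136, 137, 138, 140, 141, 142]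
theorem pvAMaj7 : getMidiScaleMap "G" "major" = pvLitMaj7 := by decide
theorem pvBMaj7 : getMidiScaleMap_alt "G" "major" = pvLitMaj7 := by decide
theorem pvEMaj7 : getMidiScaleMap "G" "major" = getMidiScaleMap_alt "G" "major" := pvAMaj7.trans pvBMaj7.symm

def pvLitMin7 : List Int := [-1, -1, -1, -1, -1, -1, -1, 0, 1, 2, 4, 5, 6, 7, 8, 10, 11, 12, 13, 14, 15, 16, 18, 19, 20, 21, 22, 24, 25, 26, 27, 28, 29, 30, 32, 33, 34, 35, 36, 38, 39, 40, 41, 42, 43, 44, 46, 47, 48, 49, 50, 52, 53, 54, 55, 56, 57, 58, 60, 61, 62, 63, 64, 66, 67, 68, 69, 70, 71, 72, 74, 75, 76, 77, 78, 80, 81, 82, 83, 84, 85, 86, 88, 89, 90, 91, 92, 94, 95, 96, 97, 98, 99, 100, 102, 103, 104, 105, 106, 108, 109, 110, 111, 112, 113, 114, 116, 117, 118, 119, 120, 122, 123, 124, 125, 126, 127, 128, 130, 131, 132, 133, 134, 136, 137, 138, 139, 140, 141, 142]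
theorem pvAMin7 : getMidiScaleMap "G" "m" = pvLitMin7 := by decide
theorem pvBMin7 : getMidiScaleMap_alt "G" "m" = pvLitMin7 := by decide
theorem pvEMin7 : getMidiScaleMap "G" "m" = getMidiScaleMap_alt "G" "m" := pvAMin7.trans pvBMin7.symm

def pvLitMaj8 : List Int := [-1, -1, -1, -1, -1, -1, -1, -1, 0, 1, 2, 3, 4, 6, 7, 8, 9, 10, 11, 12, 14, 15, 16, 17, 18, 20, 21, 22, 23, 24, 25, 26, 28, 29, 30, 31, 32, 34, 35, 36, 37, 38, 39, 40, 42, 43, 44, 45, 46, 48, 49, 50, 51, 52, 53, 54, 56, 57, 58, 59, 60, 62, 63, 64, 65, 66, 67, 68, 70, 71, 72, 73, 74, 76, 77, 78, 79, 80, 81, 82, 84, 85, 86, 87, 88, 90, 91, 92, 93, 94, 95, 96, 98, 99, 100, 101, 102, 104, 105, 106, 107, 108, 109, 110, 112, 113, 114, 115, 116, 118, 119, 120, 121, 122, 123, 124, 126, 127, 128, 129, 130, 132, 133, 134, 135, 136, 137, 138, 140, -1]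
theorem pvAMaj8 : getMidiScaleMap "G#" "major" = pvLitMaj8 := by decide
theorem pvBMaj8 : getMidiScaleMap_alt "G#" "major" = pvLitMaj8 := by decide
theorem pvEMaj8 : getMidiScaleMap "G#" "major" = getMidiScaleMap_alt "G#" "major" := pvAMaj8.trans pvBMaj8.symm

def pvLitMin8 : List Int := [-1, -1, -1, -1, -1, -1, -1, -1, 0, 1, 2, 4, 5, 6, 7, 8, 10, 11, 12, 13, 14, 15, 16, 18, 19, 20, 21, 22, 24, 25, 26, 27, 28, 29, 30, 32, 33, 34, 35, 36, 38, 39, 40, 41, 42, 43, 44, 46, 47, 48, 49, 50, 52, 53, 54, 55, 56, 57, 58, 60, 61, 62, 63, 64, 66, 67, 68, 69, 70, 71, 72, 74, 75, 76, 77, 78, 80, 81, 82, 83, 84, 85, 86, 88, 89, 90, 91, 92, 94, 95, 96, 97, 98, 99, 100, 102, 103, 104, 105, 106, 108, 109, 110, 111, 112, 113, 114, 116, 117, 118, 119, 120, 122, 123, 124, 125, 126, 127, 128, 130, 131, 132, 133, 134, 136, 137, 138, 139, 140, -1]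
theorem pvAMin8 : getMidiScaleMap "G#" "m" = pvLitMin8 := by decide
theorem pvBMin8 : getMidiScaleMap_alt "G#" "m" = pvLitMin8 := by decide
theorem pvEMin8 : getMidiScaleMap "G#" "m" = getMidiScaleMap_alt "G#" "m" := pvAMin8.trans pvBMin8.symm

def pvLitMaj9 : List Int := [-1, -1, -1, -1, -1, -1, -1, -1, -1, 0, 1, 2, 3, 4, 6, 7, 8, 9, 10, 11, 12, 14, 15, 16, 17, 18, 20, 21, 22, 23, 24, 25, 26, 28, 29, 30, 31, 32, 34, 35, 36, 37, 38, 39, 40, 42, 43, 44, 45, 46, 48, 49, 50, 51, 52, 53, 54, 56, 57, 58, 59, 60, 62, 63, 64, 65, 66, 67, 68, 70, 71, 72, 73, 74, 76, 77, 78, 79, 80, 81, 82, 84, 85, 86, 87, 88, 90, 91, 92, 93, 94, 95, 96, 98, 99, 100, 101, 102, 104, 105, 106, 107, 108, 109, 110, 112, 113, 114, 115, 116, 118, 119, 120, 121, 122, 123, 124, 126, 127, 128, 129, 130, 132, 133, 134, 135, 136, 137, 138, -1]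
theorem pvAMaj9 : getMidiScaleMap "A" "major" = pvLitMaj9 := by decide
theorem pvBMaj9 : getMidiScaleMap_alt "A" "major" = pvLitMaj9 := by decide
theorem pvEMaj9 : getMidiScaleMap "A" "major" = getMidiScaleMap_alt "A" "major" := pvAMaj9.trans pvBMaj9.symm

def pvLitMin9 : List Int := [-1, -1, -1, -1, -1, -1, -1, -1, -1, 0, 1, 2, 4, 5, 6, 7, 8, 10, 11, 12, 13, 14, 15, 16, 18, 19, 20, 21, 22, 24, 25, 26, 27, 28, 29, 30, 32, 33, 34, 35, 36, 38, 39, 40, 41, 42, 43, 44, 46, 47, 48, 49, 50, 52, 53, 54, 55, 56, 57, 58, 60, 61, 62, 63, 64, 66, 67, 68, 69, 70, 71, 72, 74, 75, 76, 77, 78, 80, 81, 82, 83, 84, 85, 86, 88, 89, 90, 91, 92, 94, 95, 96, 97, 98, 99, 100, 102, 103, 104, 105, 106, 108, 109, 110, 111, 112, 113, 114, 116, 117, 118, 119, 120, 122, 123, 124, 125, 126, 127, 128, 130, 131, 132, 133, 134, 136, 137, 138, 139, 140]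
theorem pvAMin9 : getMidiScaleMap "A" "m" = pvLitMin9 := by decide
theorem pvBMin9 : getMidiScaleMap_alt "A" "m" = pvLitMin9 := by decide
theorem pvEMin9 : getMidiScaleMap "A" "m" = getMidiScaleMap_alt "A" "m" := pvAMin9.trans pvBMin9.symm

def pvLitMaj10 : List Int := [-1, -1, -1, -1, -1, -1, -1, -1, -1, -1, 0, 1, 2, 3, 4, 6, 7, 8, 9, 10, 11, 12, 14, 15, 16, 17, 18, 20, 21, 22, 23, 24, 25, 26, 28, 29, 30, 31, 32, 34, 35, 36, 37, 38, 39, 40, 42, 43, 44, 45, 46, 48, 49, 50, 51, 52, 53, 54, 56, 57, 58, 59, 60, 62, 63, 64, 65, 66, 67, 68, 70, 71, 72, 73, 74, 76, 77, 78, 79, 80, 81, 82, 84, 85, 86, 87, 88, 90, 91, 92, 93, 94, 95, 96, 98, 99, 100, 101, 102, 104, 105, 106, 107, 108, 109, 110, 112, 113, 114, 115, 116, 118, 119, 120, 121, 122, 123, 124, 126, 127, 128, 129, 130, 132, 133, 134, 135, 136, 137, 138]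
theorem pvAMaj10 : getMidiScaleMap "A#" "major" = pvLitMaj10 := by decide
theorem pvBMaj10 : getMidiScaleMap_alt "A#" "major" = pvLitMaj10 := by decide
theorem pvEMaj10 : getMidiScaleMap "A#" "major" = getMidiScaleMap_alt "A#" "major" := pvAMaj10.trans pvBMaj10.symm

def pvLitMin10 : List Int := [-1, -1, -1, -1, -1, -1, -1, -1, -1, -1, 0, 1, 2, 4, 5, 6, 7, 8, 10, 11, 12, 13, 14, 15, 16, 18, 19, 20, 21, 22, 24, 25, 26, 27, 28, 29, 30, 32, 33, 34, 35, 36, 38, 39, 40, 41, 42, 43, 44, 46, 47, 48, 49, 50, 52, 53, 54, 55, 56, 57, 58, 60, 61, 62, 63, 64, 66, 67, 68, 69, 70, 71, 72, 74, 75, 76, 77, 78, 80, 81, 82, 83, 84, 85, 86, 88, 89, 90, 91, 92, 94, 95, 96, 97, 98, 99, 100, 102, 103, 104, 105, 106, 108, 109, 110, 111, 112, 113, 114, 116, 117, 118, 119, 120, 122, 123, 124, 125, 126, 127, 128, 130, 131, 132, 133, 134, 136, 137, 138, -1]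
theorem pvAMin10 : getMidiScaleMap "A#" "m" = pvLitMin10 := by decide
theorem pvBMin10 : getMidiScaleMap_alt "A#" "m" = pvLitMin10 := by decide
theorem pvEMin10 : getMidiScaleMap "A#" "m" = getMidiScaleMap_alt "A#" "m" := pvAMin10.trans pvBMin10.symm

def pvLitMaj11 : List Int := [-1, -1, -1, -1, -1, -1, -1, -1, -1, -1, -1, 0, 1, 2, 3, 4, 6, 7, 8, 9, 10, 11, 12, 14, 15, 16, 17, 18, 20, 21, 22, 23, 24, 25, 26, 28, 29, 30, 31, 32, 34, 35, 36, 37, 38, 39, 40, 42, 43, 44, 45, 46, 48, 49, 50, 51, 52, 53, 54, 56, 57, 58, 59, 60, 62, 63, 64, 65, 66, 67, 68, 70, 71, 72, 73, 74, 76, 77, 78, 79, 80, 81, 82, 84, 85, 86, 87, 88, 90, 91, 92, 93, 94, 95, 96, 98, 99, 100, 101, 102, 104, 105, 106, 107, 108, 109, 110, 112, 113, 114, 115, 116, 118, 119, 120, 121, 122, 123, 124, 126, 127, 128, 129, 130, 132, 133, 134, 135, 136, -1]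
theorem pvAMaj11 : getMidiScaleMap "B" "major" = pvLitMaj11 := by decide
theorem pvBMaj11 : getMidiScaleMap_alt "B" "major" = pvLitMaj11 := by decide
theorem pvEMaj11 : getMidiScaleMap "B" "major" = getMidiScaleMap_alt "B" "major" := pvAMaj11.trans pvBMaj11.symm

def pvLitMin11 : List Int := [-1, -1, -1, -1, -1, -1, -1, -1, -1, -1, -1, 0, 1, 2, 4, 5, 6, 7, 8, 10, 11, 12, 13, 14, 15, 16, 18, 19, 20, 21, 22, 24, 25, 26, 27, 28, 29, 30, 32, 33, 34, 35, 36, 38, 39, 40, 41, 42, 43, 44, 46, 47, 48, 49, 50, 52, 53, 54, 55, 56, 57, 58, 60, 61, 62, 63, 64, 66, 67, 68, 69, 70, 71, 72, 74, 75, 76, 77, 78, 80, 81, 82, 83, 84, 85, 86, 88, 89, 90, 91, 92, 94, 95, 96, 97, 98, 99, 100, 102, 103, 104, 105, 106, 108, 109, 110, 111, 112, 113, 114, 116, 117, 118, 119, 120, 122, 123, 124, 125, 126, 127, 128, 130, 131, 132, 133, 134, 136, 137, 138]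
theorem pvAMin11 : getMidiScaleMap "B" "m" = pvLitMin11 := by decide
theorem pvBMin11 : getMidiScaleMap_alt "B" "m" = pvLitMin11 := by decide
theorem pvEMin11 : getMidiScaleMap "B" "m" = getMidiScaleMap_alt "B" "m" := pvAMin11.trans pvBMin11.symm

theorem pvKeyA (mode : String) : getMidiScaleMap "A" mode = getMidiScaleMap_alt "A" mode := by
  by_cases hm : mode = "major"
  · subst hm; exact pvEMaj9
  · rw [pvA_mode _ _ hm, pvB_mode _ _ hm]; exact pvEMin9

theorem pvKeyAs (mode : String) : getMidiScaleMap "A#" mode = getMidiScaleMap_alt "A#" mode := by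
  by_cases hm : mode = "major"
  · subst hm; exact pvEMaj10
  · rw [pvA_mode _ _ hm, pvB_mode _ _ hm]; exact pvEMin10

theorem pvKeyBf (mode : String) : getMidiScaleMap "B-" mode = getMidiScaleMap_alt "B-" mode := by
  by_cases hm : mode = "major"
  · subst hm; exact ((pvA_congr "B-" "A#" "major" (by decide)).trans pvEMaj10).trans (pvB_congr "A#" "B-" "major" (by decide))
  · rw [pvA_mode _ _ hm, pvB_mode _ _ hm]; exact ((pvA_congr "B-" "A#" "m" (by decide)).trans pvEMin10).trans (pvB_congr "A#" "B-" "m" (by decide))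

theorem pvKeyB (mode : String) : getMidiScaleMap "B" mode = getMidiScaleMap_alt "B" mode := by
  by_cases hm : mode = "major"
  · subst hm; exact pvEMaj11
  · rw [pvA_mode _ _ hm, pvB_mode _ _ hm]; exact pvEMin11

theorem pvKeyC (mode : String) : getMidiScaleMap "C" mode = getMidiScaleMap_alt "C" mode := by
  by_cases hm : mode = "major"
  · subst hm; exact pvEMaj0
  · rw [pvA_mode _ _ hm, pvB_mode _ _ hm]; exact pvEMin0

theorem pvKeyCs (mode : String) : getMidiScaleMap "C#" mode = getMidiScaleMap_alt "C#" mode := by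
  by_cases hm : mode = "major"
  · subst hm; exact pvEMaj1
  · rw [pvA_mode _ _ hm, pvB_mode _ _ hm]; exact pvEMin1

theorem pvKeyDf (mode : String) : getMidiScaleMap "D-" mode = getMidiScaleMap_alt "D-" mode := by
  by_cases hm : mode = "major"
  · subst hm; exact ((pvA_congr "D-" "C#" "major" (by decide)).trans pvEMaj1).trans (pvB_congr "C#" "D-" "major" (by decide))
  · rw [pvA_mode _ _ hm, pvB_mode _ _ hm]; exact ((pvA_congr "D-" "C#" "m" (by decide)).trans pvEMin1).trans (pvB_congr "C#" "D-" "m" (by decide))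

theorem pvKeyD (mode : String) : getMidiScaleMap "D" mode = getMidiScaleMap_alt "D" mode := by
  by_cases hm : mode = "major"
  · subst hm; exact pvEMaj2
  · rw [pvA_mode _ _ hm, pvB_mode _ _ hm]; exact pvEMin2

theorem pvKeyDs (mode : String) : getMidiScaleMap "D#" mode = getMidiScaleMap_alt "D#" mode := by
  by_cases hm : mode = "major"
  · subst hm; exact pvEMaj3
  · rw [pvA_mode _ _ hm, pvB_mode _ _ hm]; exact pvEMin3

theorem pvKeyEf (mode : String) : getMidiScaleMap "E-" mode = getMidiScaleMap_alt "E-" mode := by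
  by_cases hm : mode = "major"
  · subst hm; exact ((pvA_congr "E-" "D#" "major" (by decide)).trans pvEMaj3).trans (pvB_congr "D#" "E-" "major" (by decide))
  · rw [pvA_mode _ _ hm, pvB_mode _ _ hm]; exact ((pvA_congr "E-" "D#" "m" (by decide)).trans pvEMin3).trans (pvB_congr "D#" "E-" "m" (by decide))

theorem pvKeyE (mode : String) : getMidiScaleMap "E" mode = getMidiScaleMap_alt "E" mode := by
  by_cases hm : mode = "major"
  · subst hm; exact pvEMaj4
  · rw [pvA_mode _ _ hm, pvB_mode _ _ hm]; exact pvEMin4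

theorem pvKeyF (mode : String) : getMidiScaleMap "F" mode = getMidiScaleMap_alt "F" mode := by
  by_cases hm : mode = "major"
  · subst hm; exact pvEMaj5
  · rw [pvA_mode _ _ hm, pvB_mode _ _ hm]; exact pvEMin5

theorem pvKeyFs (mode : String) : getMidiScaleMap "F#" mode = getMidiScaleMap_alt "F#" mode := by
  by_cases hm : mode = "major"
  · subst hm; exact pvEMaj6
  · rw [pvA_mode _ _ hm, pvB_mode _ _ hm]; exact pvEMin6

theorem pvKeyGf (mode : String) : getMidiScaleMap "G-" mode = getMidiScaleMap_alt "G-" mode := by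
  by_cases hm : mode = "major"
  · subst hm; exact ((pvA_congr "G-" "F#" "major" (by decide)).trans pvEMaj6).trans (pvB_congr "F#" "G-" "major" (by decide))
  · rw [pvA_mode _ _ hm, pvB_mode _ _ hm]; exact ((pvA_congr "G-" "F#" "m" (by decide)).trans pvEMin6).trans (pvB_congr "F#" "G-" "m" (by decide))

theorem pvKeyG (mode : String) : getMidiScaleMap "G" mode = getMidiScaleMap_alt "G" mode := by
  by_cases hm : mode = "major"
  · subst hm; exact pvEMaj7
  · rw [pvA_mode _ _ hm, pvB_mode _ _ hm]; exact pvEMin7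

theorem pvKeyGs (mode : String) : getMidiScaleMap "G#" mode = getMidiScaleMap_alt "G#" mode := by
  by_cases hm : mode = "major"
  · subst hm; exact pvEMaj8
  · rw [pvA_mode _ _ hm, pvB_mode _ _ hm]; exact pvEMin8

theorem pvKeyAf (mode : String) : getMidiScaleMap "A-" mode = getMidiScaleMap_alt "A-" mode := by
  by_cases hm : mode = "major"
  · subst hm; exact ((pvA_congr "A-" "G#" "major" (by decide)).trans pvEMaj8).trans (pvB_congr "G#" "A-" "major" (by decide))
  · rw [pvA_mode _ _ hm, pvB_mode _ _ hm]; exact ((pvA_congr "A-" "G#" "m" (by decide)).trans pvEMin8).trans (pvB_congr "G#" "A-" "m" (by decide))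

-- ===== VERDICT (by name: the statement is the Claim_ definition above) =====
theorem getMidiScaleMap_spec : Claim_equal_getMidiScaleMap := by
  unfold Claim_equal_getMidiScaleMap
  intro tonic mode _ hp
  unfold Spec_getMidiScaleMap
  unfold Pre_getMidiScaleMap at hp
  simp only [List.mem_cons, List.not_mem_nil, or_false] at hp
  rcases hp with rfl|rfl|rfl|rfl|rfl|rfl|rfl|rfl|rfl|rfl|rfl|rfl|rfl|rfl|rfl|rfl|rfl
  · exact pvKeyA mode
  · exact pvKeyAs mode
  · exact pvKeyBf mode
  · exact pvKeyB mode
  · exact pvKeyC mode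
  · exact pvKeyCs mode
  · exact pvKeyDf mode
  · exact pvKeyD mode
  · exact pvKeyDs mode
  · exact pvKeyEf mode
  · exact pvKeyE mode
  · exact pvKeyF mode
  · exact pvKeyFs mode
  · exact pvKeyGf mode
  · exact pvKeyG mode
  · exact pvKeyGs mode
  · exact pvKeyAf mode
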